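-- pv_equiv track=rewrite | github.com/raja-2002-hub/neet-pipeline | 5.4/main.py | clean_physics_response
-- ===== SOURCE A (Python) =====
-- def clean_physics_response(raw_text):
--     """
--     Cleans Gemini response for JSON parsing.
--     Handles:
--     1. Markdown code fences (```json ... ```)
--     2. Control characters inside JSON strings (newlines in solutions)
--     """
--     text = raw_text.strip()
--
--     # Strip markdown fences
--     if text.startswith("```"):
--         lines = text.split("\n")
--         lines = [l for l in lines if not l.strip().startswith("```")]
--         text = "\n".join(lines).strip()
--
--     # Find outermost array
--     start = text.find("[")
--     end   = text.rfind("]")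
--     if start == -1 or end == -1 or end <= start:
--         # Try object
--         start = text.find("{")
--         end   = text.rfind("}")
--         if start == -1 or end == -1:
--             return text
--
--     candidate = text[start:end+1]
--
--     # Fix control characters inside JSON strings
--     cleaned    = []
--     in_string  = False
--     escape_next = False
--     for char in candidate:
--         if escape_next:
--             cleaned.append(char)
--             escape_next = False
--         elif char == '\\':
--             cleaned.append(char)
--             escape_next = True
--         elif char == '"':
--             in_string = not in_string
--             cleaned.append(char)
--         elif in_string and ord(char) < 32:
--             # Replace control character with space
--             cleaned.append(' ')
--         else:
--             cleaned.append(char)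
--
--     return ''.join(cleaned)
-- ===== SOURCE B (Python) =====
-- def _fix_strings(s):
--     # Recursive-descent style chunk scanner: consume escape pairs whole and
--     # JSON string literals with a dedicated inner loop, instead of a flat
--     # boolean state machine.
--     out = []
--     i, n = 0, len(s)
--     while i < n:
--         c = s[i]
--         if c == '\\':
--             out.append(s[i:i+2])
--             i += 2
--         elif c == '"':
--             out.append('"')
--             i += 1
--             while i < n and s[i] != '"':
--                 if s[i] == '\\':
--                     out.append(s[i:i+2])
--                     i += 2
--                 elif ord(s[i]) < 32:
--                     out.append(' ')
--                     i += 1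
--                 else:
--                     out.append(s[i])
--                     i += 1
--             if i < n:
--                 out.append('"')
--                 i += 1
--         else:
--             out.append(c)
--             i += 1
--     return ''.join(out)
--
-- def clean_physics_response(raw_text):
--     text = raw_text.strip()
--     if text.startswith("```"):
--         text = "\n".join(
--             l for l in text.split("\n") if not l.strip().startswith("```")
--         ).strip()
--     start, end = text.find("["), text.rfind("]")
--     if start == -1 or end == -1 or end <= start:
--         start, end = text.find("{"), text.rfind("}")
--         if start == -1 or end == -1:
--             return text
--     return _fix_strings(text[start:end + 1])
-- ===== Notes on version B (the rewrite author's own statement) =====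
-- stated objective: alternative
-- what changed: The flat char-by-char state machine with in_string/escape_next boolean flags is replaced by a recursive-descent chunk scanner that consumes escape pairs whole and walks each JSON string literal with a dedicated inner loop (the identical strip/fence/bracket preamble is kept).
import Mathlib
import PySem

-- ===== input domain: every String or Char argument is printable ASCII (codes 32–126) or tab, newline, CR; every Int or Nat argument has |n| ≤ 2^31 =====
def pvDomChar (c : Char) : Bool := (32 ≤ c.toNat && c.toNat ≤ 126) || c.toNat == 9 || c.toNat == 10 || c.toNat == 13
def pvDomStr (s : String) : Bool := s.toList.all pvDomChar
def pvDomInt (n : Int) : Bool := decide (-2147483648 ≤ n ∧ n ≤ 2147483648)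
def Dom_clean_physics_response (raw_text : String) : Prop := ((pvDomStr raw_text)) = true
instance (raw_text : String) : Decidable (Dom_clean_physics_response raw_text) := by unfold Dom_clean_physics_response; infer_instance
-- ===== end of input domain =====

-- B replaces A's flat boolean state machine (in_string/escape_next flags) with a
-- recursive-descent chunk scanner (escape pairs consumed whole, string literals by a
-- dedicated inner loop); objective: alternative, same cost.
-- The strip / fence-removal / bracket-extraction preamble is identical Python in A and B,
-- so both ports share its transcription (pvFenceText / candidate selection).

-- ===== PORT A =====

-- shared transcription of the identical preamble lines of A and B:
-- text = raw_text.strip(); fence filtering; find/rfind bracket extraction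
def pvFenceText (raw : List Char) : List Char :=
  let text := PySem.Chars.strip raw
  if PySem.Chars.startswith text ['`', '`', '`'] then
    PySem.Chars.strip (PySem.Chars.join ['\n']
      ((PySem.Chars.splitOn text ['\n']).filter
        (fun l => !PySem.Chars.startswith (PySem.Chars.strip l) ['`', '`', '`'])))
  else text

-- candidate = text[start:end+1] when brackets are found, none = the early 'return text'
def pvCandidate? (text : List Char) : Option (List Char) :=
  let start := PySem.Chars.find text ['[']
  let e := PySem.Chars.rfind text [']']
  if start = -1 ∨ e = -1 ∨ e ≤ start then
    let start := PySem.Chars.find text ['{']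
    let e := PySem.Chars.rfind text ['}']
    if start = -1 ∨ e = -1 then none
    else some (PySem.List.slice text (some start) (some (e + 1)))
  else some (PySem.List.slice text (some start) (some (e + 1)))

-- A's character loop: state (in_string, escape_next), branches in A's order
def pvCleanA : List Char → Bool → Bool → List Char
  | [], _, _ => []
  | c :: rest, inString, escapeNext =>
    if escapeNext then c :: pvCleanA rest inString false
    else if c = '\\' then c :: pvCleanA rest inString true
    else if c = '"' then c :: pvCleanA rest (!inString) escapeNext
    else if inString && decide (c.toNat < 32) then ' ' :: pvCleanA rest inString escapeNext
    else c :: pvCleanA rest inString escapeNext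

def clean_physics_response (raw_text : String) : String :=
  let text := pvFenceText raw_text.toList
  match pvCandidate? text with
  | none => String.ofList text
  | some candidate => String.ofList (pvCleanA candidate false false)

-- ===== PORT B =====

-- B's nested scanner: pvOutsideB = the outer while loop (outside string literals),
-- pvInsideB = the inner while loop walking one string literal; escape pairs s[i:i+2]
-- are consumed as whole chunks.
mutual
def pvOutsideB : List Char → List Char
  | [] => []
  | '\\' :: rest =>
    match rest with
    | [] => ['\\']
    | d :: rest' => '\\' :: d :: pvOutsideB rest'
  | '"' :: rest => '"' :: pvInsideB rest
  | c :: rest => c :: pvOutsideB rest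

def pvInsideB : List Char → List Char
  | [] => []
  | '"' :: rest => '"' :: pvOutsideB rest
  | '\\' :: rest =>
    match rest with
    | [] => ['\\']
    | d :: rest' => '\\' :: d :: pvInsideB rest'
  | c :: rest => (if c.toNat < 32 then ' ' else c) :: pvInsideB rest
end

def clean_physics_response_alt (raw_text : String) : String :=
  let text := pvFenceText raw_text.toList
  match pvCandidate? text with
  | none => String.ofList text
  | some candidate => String.ofList (pvOutsideB candidate)

-- ===== PRECONDITION & SPEC =====
def Spec_clean_physics_response (raw_text : String) (out : String) : Prop := out = clean_physics_response_alt raw_text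
instance (raw_text : String) (out : String) : Decidable (Spec_clean_physics_response raw_text out) := by unfold Spec_clean_physics_response; infer_instance

-- ===== CLAIM (what is proved, stated in full; the proofs are below) =====
def Claim_equal_clean_physics_response : Prop := ∀ (raw_text : String), Dom_clean_physics_response raw_text → Spec_clean_physics_response raw_text (clean_physics_response raw_text)

-- ===== LEMMAS AND PROOFS =====

-- A's state machine and B's chunk scanner produce the same characters, in both modes.
lemma pvClean_agree : ∀ cs : List Char,
    pvCleanA cs false false = pvOutsideB cs ∧ pvCleanA cs true false = pvInsideB cs := by
  intro cs
  induction hn : cs.length using Nat.strong_induction_on generalizing cs with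
  | _ n ih =>
    match cs with
    | [] => simp [pvCleanA, pvOutsideB, pvInsideB]
    | c :: rest =>
      by_cases hb : c = '\\'
      · subst hb
        match rest with
        | [] => simp [pvCleanA, pvOutsideB, pvInsideB]
        | d :: rest' =>
          have h' := ih rest'.length (by simp at hn; omega) rest' rfl
          simp [pvCleanA, pvOutsideB, pvInsideB, h'.1, h'.2]
      · by_cases hq : c = '"'
        · subst hq
          have h' := ih rest.length (by simp at hn; omega) rest rfl
          simp [pvCleanA, pvOutsideB, pvInsideB, h'.1, h'.2]
        · have h' := ih rest.length (by simp at hn; omega) rest rfl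
          constructor
          · simp [pvCleanA, pvOutsideB, hb, hq, h'.1]
          · simp [pvCleanA, pvInsideB, hb, hq, h'.2]
            split <;> rfl

-- ===== VERDICT (by name: the statement is the Claim_ definition above) =====
theorem clean_physics_response_spec : Claim_equal_clean_physics_response := by
  intro raw_text _
  unfold Spec_clean_physics_response clean_physics_response clean_physics_response_alt
  cases h : pvCandidate? (pvFenceText raw_text.toList) with
  | none => simp [h]
  | some candidate => simp [h, (pvClean_agree candidate).1]
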